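-- pv_equiv track=rewrite | github.com/matthiasalexrsr/Rhinosfaction | formular_eingabevalidierung_test_simplified.py | _is_safe_input
-- ===== SOURCE A (Python) =====
-- def _is_safe_input(input_text):
--     """Prüft Eingabe auf Sicherheit"""
--     dangerous_patterns = [
--         'DROP TABLE', 'INSERT INTO', 'UPDATE SET', 'DELETE FROM',
--         '<script', 'javascript:', 'onerror=', 'onload=',
--         'SELECT *', 'UNION SELECT', '--', "';"
--     ]
--
--     input_lower = input_text.lower()
--     for pattern in dangerous_patterns:
--         if pattern.lower() in input_lower:
--             return True  # Gefährlich erkannt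
--
--     return False  # Wahrscheinlich sicher
-- ===== SOURCE B (Python) =====
-- def _is_safe_input(input_text):
--     """Aho-Corasick: build one multi-pattern automaton (trie + failure links)
--     over the lowered patterns, then detect any dangerous pattern in a single
--     pass over the lowered input, one state transition per character."""
--     patterns = [
--         'drop table', 'insert into', 'update set', 'delete from',
--         '<script', 'javascript:', 'onerror=', 'onload=',
--         'select *', 'union select', '--', "';"
--     ]
--     # trie
--     goto = [{}]          # state -> {char: next state}
--     out = [False]        # state -> a pattern ends here (or at a failure ancestor)
--     for p in patterns:
--         s = 0
--         for ch in p: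
--             nxt = goto[s].get(ch)
--             if nxt is None:
--                 nxt = len(goto)
--                 goto[s][ch] = nxt
--                 goto.append({})
--                 out.append(False)
--             s = nxt
--         out[s] = True
--     # failure links, BFS order (list used as queue)
--     fail = [0] * len(goto)
--     queue = list(goto[0].values())
--     qi = 0
--     while qi < len(queue):
--         s = queue[qi]
--         qi += 1
--         for ch, t in goto[s].items():
--             queue.append(t)
--             f = fail[s]
--             while f != 0 and ch not in goto[f]:
--                 f = fail[f]
--             nf = goto[f].get(ch, 0)
--             fail[t] = 0 if nf == t else nf
--             if out[fail[t]]: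
--                 out[t] = True
--     # scan
--     s = 0
--     for ch in input_text.lower():
--         while s != 0 and ch not in goto[s]:
--             s = fail[s]
--         s = goto[s].get(ch, 0)
--         if out[s]:
--             return True
--     return False
-- ===== Notes on version B (the rewrite author's own statement) =====
-- stated objective: alternative
-- what changed: B replaces twelve independent whole-string substring searches with an Aho-Corasick multi-pattern automaton: it builds a trie of the lowered patterns with BFS failure links and detects any pattern in a single left-to-right pass, one state transition per character.
import Mathlib
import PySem

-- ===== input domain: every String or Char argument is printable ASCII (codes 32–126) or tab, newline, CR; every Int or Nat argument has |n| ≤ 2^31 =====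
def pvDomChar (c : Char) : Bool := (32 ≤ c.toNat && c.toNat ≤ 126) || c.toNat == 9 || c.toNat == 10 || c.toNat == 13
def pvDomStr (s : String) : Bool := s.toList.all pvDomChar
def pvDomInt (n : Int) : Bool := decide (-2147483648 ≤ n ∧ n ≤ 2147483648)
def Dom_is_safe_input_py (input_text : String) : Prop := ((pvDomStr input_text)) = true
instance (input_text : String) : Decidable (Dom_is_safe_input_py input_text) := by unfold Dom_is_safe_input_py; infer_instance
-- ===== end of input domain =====

-- B replaces twelve independent substring searches by an Aho-Corasick automaton
-- (trie + failure links) detecting all patterns in one pass (objective: alternative).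

-- ===== PORT A =====
def pvDangerousPatterns : List String :=
  ["DROP TABLE", "INSERT INTO", "UPDATE SET", "DELETE FROM",
   "<script", "javascript:", "onerror=", "onload=",
   "SELECT *", "UNION SELECT", "--", "';"]

-- the for-loop with early return over the pattern list
def pvLoopA (ps : List String) (inputLower : List Char) : Bool :=
  match ps with
  | [] => false
  | p :: rest =>
    if PySem.Chars.isIn (PySem.Chars.lower p.toList) inputLower then true
    else pvLoopA rest inputLower

def is_safe_input_py (input_text : String) : Bool :=
  pvLoopA pvDangerousPatterns (PySem.Chars.lower input_text.toList)

-- ===== PORT B =====  (Source B: Aho-Corasick automaton, built once, then one scan)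
def pvLoweredPatterns : List (List Char) :=
  ["drop table".toList, "insert into".toList, "update set".toList, "delete from".toList,
   "<script".toList, "javascript:".toList, "onerror=".toList, "onload=".toList,
   "select *".toList, "union select".toList, "--".toList, "';".toList]

-- trie insertion: the inner `for ch in p` loop of Source B (state = (goto, out, s))
def pvTrieStep (st : List (PySem.Dict Char Nat) × List Bool × Nat) (ch : Char) :
    List (PySem.Dict Char Nat) × List Bool × Nat :=
  let (g, o, s) := st
  match (g.getD s PySem.Dict.empty).get? ch with
  | some nxt => (g, o, nxt)
  | none =>
    let nxt := g.length
    (g.set s ((g.getD s PySem.Dict.empty).insert ch nxt) ++ [PySem.Dict.empty],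
     o ++ [false], nxt)

-- `for p in patterns` body
def pvTrieInsert (st : List (PySem.Dict Char Nat) × List Bool) (p : List Char) :
    List (PySem.Dict Char Nat) × List Bool :=
  let (g, o, s) := p.foldl pvTrieStep (st.1, st.2, 0)
  (g, o.set s true)

def pvTrie : List (PySem.Dict Char Nat) × List Bool :=
  pvLoweredPatterns.foldl pvTrieInsert ([PySem.Dict.empty], [false])

-- `while f != 0 and ch not in goto[f]: f = fail[f]` (fuel only guards termination)
def pvFollow (g : List (PySem.Dict Char Nat)) (fl : List Nat) (f : Nat) (ch : Char) :
    Nat → Nat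
  | 0 => f
  | fuel + 1 =>
    if f ≠ 0 ∧ (g.getD f PySem.Dict.empty).contains ch = false then
      pvFollow g fl (fl.getD f 0) ch fuel
    else f

-- `for ch, t in goto[s].items()` body of the BFS loop (state = (fail, out, queue))
def pvBFSNode (g : List (PySem.Dict Char Nat)) (st : List Nat × List Bool × List Nat)
    (s : Nat) : List Nat × List Bool × List Nat :=
  (g.getD s PySem.Dict.empty).items.foldl
    (fun (st : List Nat × List Bool × List Nat) (p : Char × Nat) =>
      let (fl, o, q) := st
      let (ch, t) := p
      let q := q ++ [t]
      let f := pvFollow g fl (fl.getD s 0) ch g.length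
      let nf := (g.getD f PySem.Dict.empty).getD ch 0
      let flt := if nf = t then 0 else nf
      let fl := fl.set t flt
      let o := if o.getD flt false then o.set t true else o
      (fl, o, q))
    st

-- `while qi < len(queue)` (fuel = number of states bounds the dequeues)
def pvBFS (g : List (PySem.Dict Char Nat)) (qi : Nat)
    (st : List Nat × List Bool × List Nat) : Nat → List Nat × List Bool
  | 0 => (st.1, st.2.1)
  | fuel + 1 =>
    if qi < st.2.2.length then
      pvBFS g (qi + 1) (pvBFSNode g st (st.2.2.getD qi 0)) fuel
    else (st.1, st.2.1)

-- the automaton Source B builds before scanning (input-independent, hence hoisted)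
def pvAuto : List (PySem.Dict Char Nat) × List Nat × List Bool :=
  let (g, o) := pvTrie
  let q0 := (g.getD 0 PySem.Dict.empty).values
  let (fl, o') := pvBFS g 0 (List.replicate g.length 0, o, q0) g.length
  (g, fl, o')

-- one scan transition: fail-chain then goto (s = goto[s].get(ch, 0))
def pvDelta (g : List (PySem.Dict Char Nat)) (fl : List Nat) (s : Nat) (ch : Char) : Nat :=
  let s1 := pvFollow g fl s ch g.length
  (g.getD s1 PySem.Dict.empty).getD ch 0

-- `for ch in input_text.lower()` with early return
def pvScanLoop (g : List (PySem.Dict Char Nat)) (fl : List Nat) (o : List Bool)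
    (s : Nat) : List Char → Bool
  | [] => false
  | ch :: rest =>
    let s' := pvDelta g fl s ch
    if o.getD s' false then true else pvScanLoop g fl o s' rest

def is_safe_input_py_alt (input_text : String) : Bool :=
  let (g, fl, o) := pvAuto
  pvScanLoop g fl o 0 (PySem.Chars.lower input_text.toList)

-- ===== PRECONDITION & SPEC =====
def Spec_is_safe_input_py (input_text : String) (out : Bool) : Prop := out = is_safe_input_py_alt input_text
instance (input_text : String) (out : Bool) : Decidable (Spec_is_safe_input_py input_text out) := by unfold Spec_is_safe_input_py; infer_instance

-- ===== CLAIM (what is proved, stated in full; the proofs are below) =====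
def Claim_equal_is_safe_input_py : Prop := ∀ (input_text : String), Dom_is_safe_input_py input_text → Spec_is_safe_input_py input_text (is_safe_input_py input_text)

-- ===== LEMMAS AND PROOFS =====

-- words of the automaton's states, in state order (node i recognises pvWords[i])
def pvWords : List (List Char) :=
  [[],
   ['d'],['d','r'],['d','r','o'],['d','r','o','p'],['d','r','o','p',' '],
   ['d','r','o','p',' ','t'],['d','r','o','p',' ','t','a'],['d','r','o','p',' ','t','a','b'],
   ['d','r','o','p',' ','t','a','b','l'],['d','r','o','p',' ','t','a','b','l','e'],
   ['i'],['i','n'],['i','n','s'],['i','n','s','e'],['i','n','s','e','r'],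
   ['i','n','s','e','r','t'],['i','n','s','e','r','t',' '],['i','n','s','e','r','t',' ','i'],
   ['i','n','s','e','r','t',' ','i','n'],['i','n','s','e','r','t',' ','i','n','t'],
   ['i','n','s','e','r','t',' ','i','n','t','o'],
   ['u'],['u','p'],['u','p','d'],['u','p','d','a'],['u','p','d','a','t'],
   ['u','p','d','a','t','e'],['u','p','d','a','t','e',' '],['u','p','d','a','t','e',' ','s'],
   ['u','p','d','a','t','e',' ','s','e'],['u','p','d','a','t','e',' ','s','e','t'],
   ['d','e'],['d','e','l'],['d','e','l','e'],['d','e','l','e','t'],['d','e','l','e','t','e'],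
   ['d','e','l','e','t','e',' '],['d','e','l','e','t','e',' ','f'],
   ['d','e','l','e','t','e',' ','f','r'],['d','e','l','e','t','e',' ','f','r','o'],
   ['d','e','l','e','t','e',' ','f','r','o','m'],
   ['<'],['<','s'],['<','s','c'],['<','s','c','r'],['<','s','c','r','i'],
   ['<','s','c','r','i','p'],['<','s','c','r','i','p','t'],
   ['j'],['j','a'],['j','a','v'],['j','a','v','a'],['j','a','v','a','s'],
   ['j','a','v','a','s','c'],['j','a','v','a','s','c','r'],['j','a','v','a','s','c','r','i'],
   ['j','a','v','a','s','c','r','i','p'],['j','a','v','a','s','c','r','i','p','t'],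
   ['j','a','v','a','s','c','r','i','p','t',':'],
   ['o'],['o','n'],['o','n','e'],['o','n','e','r'],['o','n','e','r','r'],
   ['o','n','e','r','r','o'],['o','n','e','r','r','o','r'],['o','n','e','r','r','o','r','='],
   ['o','n','l'],['o','n','l','o'],['o','n','l','o','a'],['o','n','l','o','a','d'],
   ['o','n','l','o','a','d','='],
   ['s'],['s','e'],['s','e','l'],['s','e','l','e'],['s','e','l','e','c'],
   ['s','e','l','e','c','t'],['s','e','l','e','c','t',' '],['s','e','l','e','c','t',' ','*'],
   ['u','n'],['u','n','i'],['u','n','i','o'],['u','n','i','o','n'],['u','n','i','o','n',' '],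
   ['u','n','i','o','n',' ','s'],['u','n','i','o','n',' ','s','e'],
   ['u','n','i','o','n',' ','s','e','l'],['u','n','i','o','n',' ','s','e','l','e'],
   ['u','n','i','o','n',' ','s','e','l','e','c'],['u','n','i','o','n',' ','s','e','l','e','c','t'],
   ['-'],['-','-'],
   ['\''],['\'',';']]

-- the longest suffix of t that is a state word
-- the three computed tables, as literals (checked below in pvAuto_eq)
def pvGL : List (PySem.Dict Char Nat) :=
  [PySem.Dict.ofList [('d',1),('i',11),('u',22),('<',42),('j',49),('o',60),('s',73),('-',92),('\'',94)],
   PySem.Dict.ofList [('r',2),('e',32)], PySem.Dict.ofList [('o',3)], PySem.Dict.ofList [('p',4)],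
   PySem.Dict.ofList [(' ',5)], PySem.Dict.ofList [('t',6)], PySem.Dict.ofList [('a',7)],
   PySem.Dict.ofList [('b',8)], PySem.Dict.ofList [('l',9)], PySem.Dict.ofList [('e',10)],
   PySem.Dict.ofList [], PySem.Dict.ofList [('n',12)], PySem.Dict.ofList [('s',13)],
   PySem.Dict.ofList [('e',14)], PySem.Dict.ofList [('r',15)], PySem.Dict.ofList [('t',16)],
   PySem.Dict.ofList [(' ',17)], PySem.Dict.ofList [('i',18)], PySem.Dict.ofList [('n',19)],
   PySem.Dict.ofList [('t',20)], PySem.Dict.ofList [('o',21)], PySem.Dict.ofList [],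
   PySem.Dict.ofList [('p',23),('n',81)], PySem.Dict.ofList [('d',24)], PySem.Dict.ofList [('a',25)],
   PySem.Dict.ofList [('t',26)], PySem.Dict.ofList [('e',27)], PySem.Dict.ofList [(' ',28)],
   PySem.Dict.ofList [('s',29)], PySem.Dict.ofList [('e',30)], PySem.Dict.ofList [('t',31)],
   PySem.Dict.ofList [], PySem.Dict.ofList [('l',33)], PySem.Dict.ofList [('e',34)],
   PySem.Dict.ofList [('t',35)], PySem.Dict.ofList [('e',36)], PySem.Dict.ofList [(' ',37)],
   PySem.Dict.ofList [('f',38)], PySem.Dict.ofList [('r',39)], PySem.Dict.ofList [('o',40)],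
   PySem.Dict.ofList [('m',41)], PySem.Dict.ofList [], PySem.Dict.ofList [('s',43)],
   PySem.Dict.ofList [('c',44)], PySem.Dict.ofList [('r',45)], PySem.Dict.ofList [('i',46)],
   PySem.Dict.ofList [('p',47)], PySem.Dict.ofList [('t',48)], PySem.Dict.ofList [],
   PySem.Dict.ofList [('a',50)], PySem.Dict.ofList [('v',51)], PySem.Dict.ofList [('a',52)],
   PySem.Dict.ofList [('s',53)], PySem.Dict.ofList [('c',54)], PySem.Dict.ofList [('r',55)],
   PySem.Dict.ofList [('i',56)], PySem.Dict.ofList [('p',57)], PySem.Dict.ofList [('t',58)],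
   PySem.Dict.ofList [(':',59)], PySem.Dict.ofList [], PySem.Dict.ofList [('n',61)],
   PySem.Dict.ofList [('e',62),('l',68)], PySem.Dict.ofList [('r',63)], PySem.Dict.ofList [('r',64)],
   PySem.Dict.ofList [('o',65)], PySem.Dict.ofList [('r',66)], PySem.Dict.ofList [('=',67)],
   PySem.Dict.ofList [], PySem.Dict.ofList [('o',69)], PySem.Dict.ofList [('a',70)],
   PySem.Dict.ofList [('d',71)], PySem.Dict.ofList [('=',72)], PySem.Dict.ofList [],
   PySem.Dict.ofList [('e',74)], PySem.Dict.ofList [('l',75)], PySem.Dict.ofList [('e',76)],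
   PySem.Dict.ofList [('c',77)], PySem.Dict.ofList [('t',78)], PySem.Dict.ofList [(' ',79)],
   PySem.Dict.ofList [('*',80)], PySem.Dict.ofList [], PySem.Dict.ofList [('i',82)],
   PySem.Dict.ofList [('o',83)], PySem.Dict.ofList [('n',84)], PySem.Dict.ofList [(' ',85)],
   PySem.Dict.ofList [('s',86)], PySem.Dict.ofList [('e',87)], PySem.Dict.ofList [('l',88)],
   PySem.Dict.ofList [('e',89)], PySem.Dict.ofList [('c',90)], PySem.Dict.ofList [('t',91)],
   PySem.Dict.ofList [], PySem.Dict.ofList [('-',93)], PySem.Dict.ofList [],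
   PySem.Dict.ofList [(';',95)], PySem.Dict.ofList []]

def pvFL : List Nat :=
  [0, 0, 0, 60, 0, 0, 0, 0, 0, 0, 0, 0, 0, 73, 74, 0, 0, 0, 11, 12, 0, 60, 0, 0, 1, 0, 0, 0,
   0, 73, 74, 0, 0, 0, 0, 0, 0, 0, 0, 0, 60, 0, 0, 73, 0, 0, 11, 0, 0, 0, 0, 0, 0, 73, 0, 0,
   11, 0, 0, 0, 0, 0, 0, 0, 0, 60, 0, 0, 0, 60, 0, 1, 0, 0, 0, 0, 0, 0, 0, 0, 0, 0, 11, 60,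
   61, 0, 73, 74, 75, 76, 77, 78, 0, 92, 0, 0]

def pvOL : List Bool :=
  [false,false,false,false,false,false,false,false,false,false,true,false,false,false,false,
   false,false,false,false,false,false,true,false,false,false,false,false,false,false,false,
   false,true,false,false,false,false,false,false,false,false,false,true,false,false,false,
   false,false,false,true,false,false,false,false,false,false,false,false,false,false,true,
   false,false,false,false,false,false,false,true,false,false,false,false,true,false,false,
   false,false,false,false,false,true,false,false,false,false,false,false,false,false,false,
   false,true,false,true,false,true]

set_option maxRecDepth 100000 in
set_option maxHeartbeats 4000000 in
set_option maxRecDepth 100000 in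
set_option maxHeartbeats 4000000 in
theorem pvAuto_eq : pvAuto = (pvGL, pvFL, pvOL) := by decide

-- ===== finite facts about the literal tables (all cheap `decide`s) =====
def pvWordOf (s : Nat) : List Char := pvWords.getD s []

def pvIdx (w : List Char) : Nat := pvWords.idxOf w

-- every goto edge (s -c-> t) extends the state word by c
def pvCheckEdges : Bool :=
  (List.range 96).all fun s =>
    ((pvGL.getD s PySem.Dict.empty).items).all fun ct =>
      decide (ct.2 < 96) && (pvWordOf ct.2 == pvWordOf s ++ [ct.1])

-- every fail link points to the longest proper state-word suffix
def pvCheckFail : Bool :=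
  (List.range 96).all fun s =>
    s == 0 ||
      ((pvFL.getD s 0) < 96 &&
       decide ((pvWordOf (pvFL.getD s 0)).length < (pvWordOf s).length) &&
       (pvWordOf (pvFL.getD s 0)).isSuffixOf (pvWordOf s) &&
       pvWords.all fun w =>
         !(w.isSuffixOf (pvWordOf s) && decide (w.length < (pvWordOf s).length)) ||
           w.isSuffixOf (pvWordOf (pvFL.getD s 0)))

-- every nonempty state word is an edge out of its dropLast state
def pvCheckExt : Bool :=
  pvWords.all fun w =>
    w.isEmpty ||
      (pvGL.getD (pvIdx w.dropLast) PySem.Dict.empty).contains (w.getLastD ' ')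

-- out flags = "some pattern is a suffix of the state word"
def pvCheckOut : Bool :=
  (List.range 96).all fun s =>
    pvOL.getD s false == pvLoweredPatterns.any (fun p => p.isSuffixOf (pvWordOf s))

set_option maxRecDepth 100000 in
set_option maxHeartbeats 1000000 in
theorem pvCheckEdges_true : pvCheckEdges = true := by decide
set_option maxRecDepth 100000 in
set_option maxHeartbeats 1000000 in
theorem pvCheckFail_true : pvCheckFail = true := by decide
set_option maxRecDepth 100000 in
set_option maxHeartbeats 1000000 in
theorem pvCheckExt_true : pvCheckExt = true := by decide
set_option maxRecDepth 100000 in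
set_option maxHeartbeats 1000000 in
theorem pvCheckOut_true : pvCheckOut = true := by decide
theorem pvWords_len : pvWords.length = 96 := by decide
set_option maxRecDepth 100000 in
set_option maxHeartbeats 1000000 in
theorem pvWords_nodup : pvWords.Nodup := by decide
theorem pvWords_short : pvWords.all (fun w => decide (w.length ≤ 12)) = true := by decide
theorem pvNil_mem : ([] : List Char) ∈ pvWords := by decide
theorem pvIdx_nil : pvIdx [] = 0 := by decide
theorem pvDropLast_closed : pvWords.all (fun w => decide (w.dropLast ∈ pvWords)) = true := by decide
theorem pvPats_sub : pvLoweredPatterns.all (fun p => decide (p ∈ pvWords)) = true := by decide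
theorem pvPats_ne_nil : pvLoweredPatterns.all (fun p => !p.isEmpty) = true := by decide
set_option maxRecDepth 100000 in
set_option maxHeartbeats 1000000 in
theorem pvPatterns_lower :
    pvDangerousPatterns.map (fun p => PySem.Chars.lower p.toList) = pvLoweredPatterns := by decide
theorem pvGL_len : pvGL.length = 96 := by decide

-- ===== the longest state-word suffix =====
def pvLongSuf : List Char → List Char
  | [] => []
  | t@(_ :: t') => if t ∈ pvWords then t else pvLongSuf t'

theorem pvLongSuf_suffix (t : List Char) : pvLongSuf t <:+ t := by
  induction t with
  | nil => simp [pvLongSuf]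
  | cons a t' ih =>
    simp only [pvLongSuf]
    split
    · exact List.suffix_rfl
    · exact ih.trans (List.suffix_cons a t')

theorem pvLongSuf_mem (t : List Char) : pvLongSuf t ∈ pvWords := by
  induction t with
  | nil => simpa [pvLongSuf] using pvNil_mem
  | cons a t' ih =>
    simp only [pvLongSuf]
    split
    · assumption
    · exact ih

theorem pvLongSuf_of_mem (t : List Char) (h : t ∈ pvWords) : pvLongSuf t = t := by
  cases t with
  | nil => rfl
  | cons a t' => simp [pvLongSuf, h]

theorem pvLongSuf_max (t w : List Char) (hw : w ∈ pvWords) (hsuf : w <:+ t) :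
    w <:+ pvLongSuf t := by
  induction t with
  | nil => simpa [pvLongSuf] using hsuf
  | cons a t' ih =>
    simp only [pvLongSuf]
    split
    · exact hsuf
    · rcases List.suffix_cons_iff.mp hsuf with h | h
      · subst h; contradiction
      · exact ih h

theorem pvLongSuf_eq_of (x y : List Char) (hy : y ∈ pvWords) (hsuf : y <:+ x)
    (hmax : ∀ w ∈ pvWords, w <:+ x → w <:+ y) : pvLongSuf x = y := by
  have h1 : y <:+ pvLongSuf x := pvLongSuf_max x y hy hsuf
  have h2 : pvLongSuf x <:+ y := hmax _ (pvLongSuf_mem x) (pvLongSuf_suffix x)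
  exact h2.eq_of_length (le_antisymm h2.length_le h1.length_le)

-- decompose a nonempty suffix of t ++ [c]
theorem pvSuffix_snoc (w t : List Char) (c : Char) (h : w <:+ t ++ [c]) :
    w = [] ∨ ∃ w', w = w' ++ [c] ∧ w' <:+ t := by
  rcases List.eq_nil_or_concat w with rfl | ⟨w', d, rfl⟩
  · exact Or.inl rfl
  · right
    rcases h with ⟨pre, hpre⟩
    have h2 : (pre ++ w') ++ [d] = t ++ [c] := by simpa [List.append_assoc] using hpre
    have hd : d = c := by
      have := congrArg (·.getLast?) h2
      simpa [List.getLast?_append] using this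
    have ht : pre ++ w' = t := by
      have := congrArg (·.dropLast) h2
      simpa [List.dropLast_append_of_ne_nil] using this
    exact ⟨w', by simp [List.concat_eq_append, hd], ⟨pre, ht⟩⟩

theorem pvMem_dropLast (w : List Char) (hw : w ∈ pvWords) : w.dropLast ∈ pvWords := by
  have h := pvDropLast_closed
  rw [List.all_eq_true] at h
  simpa using h w hw

theorem pvSuffix_append_snoc (u t : List Char) (c : Char) (h : u <:+ t) :
    u ++ [c] <:+ t ++ [c] := by
  rcases h with ⟨pre, rfl⟩
  exact ⟨pre, by simp [List.append_assoc]⟩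

-- ===== index/word round trips =====
theorem pvWordOf_mem (s : Nat) (hs : s < 96) : pvWordOf s ∈ pvWords := by
  have hlt : s < pvWords.length := by rw [pvWords_len]; exact hs
  rw [pvWordOf, List.getD_eq_getElem _ _ hlt]
  exact List.getElem_mem hlt

theorem pvIdx_lt (w : List Char) (hw : w ∈ pvWords) : pvIdx w < 96 := by
  rw [← pvWords_len]
  exact List.idxOf_lt_length_of_mem hw

theorem pvWordOf_idx (w : List Char) (hw : w ∈ pvWords) : pvWordOf (pvIdx w) = w := by
  have hlt : pvWords.idxOf w < pvWords.length := List.idxOf_lt_length_of_mem hw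
  rw [pvWordOf, pvIdx, List.getD_eq_getElem _ _ hlt, List.getElem_idxOf]

theorem pvIdx_wordOf (s : Nat) (hs : s < 96) : pvIdx (pvWordOf s) = s := by
  have hlt : s < pvWords.length := by rw [pvWords_len]; exact hs
  rw [pvWordOf, List.getD_eq_getElem _ _ hlt, pvIdx]
  exact pvWords_nodup.idxOf_getElem s hlt

theorem pvWord_short (s : Nat) (hs : s < 96) : (pvWordOf s).length ≤ 12 := by
  have h := pvWords_short
  rw [List.all_eq_true] at h
  simpa using h _ (pvWordOf_mem s hs)

-- ===== lifted table facts =====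
theorem pvEdge_spec (s : Nat) (hs : s < 96) (c : Char) (t : Nat)
    (h : (pvGL.getD s PySem.Dict.empty).get? c = some t) :
    t < 96 ∧ pvWordOf t = pvWordOf s ++ [c] := by
  have hck := pvCheckEdges_true
  rw [pvCheckEdges, List.all_eq_true] at hck
  have h1 := hck s (List.mem_range.mpr hs)
  rw [List.all_eq_true] at h1
  have h2 := h1 (c, t) (PySem.Dict.mem_items_of_get?_eq_some _ h)
  rcases (Bool.and_eq_true _ _).mp h2 with ⟨ha, hb⟩
  exact ⟨by simpa using ha, by simpa using hb⟩

theorem pvFail_spec (s : Nat) (hs : s < 96) (hs0 : s ≠ 0) :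
    pvFL.getD s 0 < 96 ∧
    (pvWordOf (pvFL.getD s 0)).length < (pvWordOf s).length ∧
    pvWordOf (pvFL.getD s 0) <:+ pvWordOf s ∧
    ∀ w ∈ pvWords, w <:+ pvWordOf s → w.length < (pvWordOf s).length →
      w <:+ pvWordOf (pvFL.getD s 0) := by
  have hck := pvCheckFail_true
  rw [pvCheckFail, List.all_eq_true] at hck
  have h1 := hck s (List.mem_range.mpr hs)
  rw [Bool.or_eq_true] at h1
  rcases h1 with h1 | h1
  · exact absurd (by simpa using h1) hs0
  · rcases (Bool.and_eq_true _ _).mp h1 with ⟨h2, h3⟩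
    rcases (Bool.and_eq_true _ _).mp h2 with ⟨h4, h5⟩
    rcases (Bool.and_eq_true _ _).mp h4 with ⟨h6, h7⟩
    refine ⟨by simpa using h6, by simpa using h7,
      List.isSuffixOf_iff_suffix.mp h5, ?_⟩
    intro w hw hsuf hlen
    rw [List.all_eq_true] at h3
    have h8 := h3 w hw
    rw [Bool.or_eq_true, Bool.not_eq_eq_eq_not, Bool.not_true, Bool.and_eq_false_iff] at h8
    rcases h8 with h8 | h8
    · rcases h8 with h8 | h8
      · exact absurd (List.isSuffixOf_iff_suffix.mpr hsuf) (by simp [h8])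
      · exact absurd hlen (by simpa using h8)
    · exact List.isSuffixOf_iff_suffix.mp h8

-- nonempty state words are edges out of their parent state
theorem pvExt_spec (w : List Char) (c : Char) (hw : w ++ [c] ∈ pvWords) :
    (pvGL.getD (pvIdx w) PySem.Dict.empty).contains c = true := by
  have hck := pvCheckExt_true
  rw [pvCheckExt, List.all_eq_true] at hck
  have h1 := hck _ hw
  rw [Bool.or_eq_true] at h1
  rcases h1 with h1 | h1
  · simp [List.isEmpty_iff] at h1
  · simpa [List.getLastD_concat] using h1

theorem pvOut_iff (s : Nat) (hs : s < 96) :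
    pvOL.getD s false = true ↔ ∃ p ∈ pvLoweredPatterns, p <:+ pvWordOf s := by
  have h := pvCheckOut_true
  rw [pvCheckOut, List.all_eq_true] at h
  have h2 := h s (List.mem_range.mpr hs)
  rw [beq_iff_eq] at h2
  rw [h2, List.any_eq_true]
  constructor
  · rintro ⟨p, hp, hsuf⟩; exact ⟨p, hp, List.isSuffixOf_iff_suffix.mp hsuf⟩
  · rintro ⟨p, hp, hsuf⟩; exact ⟨p, hp, List.isSuffixOf_iff_suffix.mpr hsuf⟩

-- ===== the scan transition computes the longest-suffix state =====
theorem pvFollow_succ (g : List (PySem.Dict Char Nat)) (fl : List Nat) (f : Nat) (ch : Char)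
    (fuel : Nat) :
    pvFollow g fl f ch (fuel + 1) =
      if f ≠ 0 ∧ (g.getD f PySem.Dict.empty).contains ch = false then
        pvFollow g fl (fl.getD f 0) ch fuel
      else f := rfl

theorem pvFollow_stay (g : List (PySem.Dict Char Nat)) (fl : List Nat) (f : Nat) (ch : Char)
    (fuel : Nat) (h : ¬(f ≠ 0 ∧ (g.getD f PySem.Dict.empty).contains ch = false)) :
    pvFollow g fl f ch fuel = f := by
  cases fuel with
  | zero => rfl
  | succ n => rw [pvFollow_succ, if_neg h]

-- enough fuel makes pvFollow fuel-independent (the fail chain shortens the word)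
theorem pvFollow_fuel (n : Nat) : ∀ s, s < 96 → (pvWordOf s).length ≤ n →
    ∀ c f1 f2, n ≤ f1 → n ≤ f2 →
      pvFollow pvGL pvFL s c f1 = pvFollow pvGL pvFL s c f2 := by
  induction n with
  | zero =>
    intro s hs hlen c f1 f2 _ _
    have h : ¬(s ≠ 0 ∧ (pvGL.getD s PySem.Dict.empty).contains c = false) := by
      rintro ⟨hs0, -⟩
      have := (pvFail_spec s hs hs0).2.1
      omega
    rw [pvFollow_stay _ _ _ _ _ h, pvFollow_stay _ _ _ _ _ h]
  | succ n ih =>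
    intro s hs hlen c f1 f2 hf1 hf2
    by_cases h : s ≠ 0 ∧ (pvGL.getD s PySem.Dict.empty).contains c = false
    · obtain ⟨hf96, hflen, -, -⟩ := pvFail_spec s hs h.1
      obtain ⟨f1', rfl⟩ : ∃ k, f1 = k + 1 := ⟨f1 - 1, by omega⟩
      obtain ⟨f2', rfl⟩ : ∃ k, f2 = k + 1 := ⟨f2 - 1, by omega⟩
      rw [pvFollow_succ, pvFollow_succ, if_pos h, if_pos h]
      exact ih _ hf96 (by omega) c f1' f2' (by omega) (by omega)
    · rw [pvFollow_stay _ _ _ _ _ h, pvFollow_stay _ _ _ _ _ h]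

theorem pvStep_eq (s : Nat) (hs : s < 96) (c : Char) :
    pvDelta pvGL pvFL s c = pvIdx (pvLongSuf (pvWordOf s ++ [c])) := by
  generalize hn : (pvWordOf s).length = n
  induction n using Nat.strong_induction_on generalizing s with
  | _ n ih =>
  subst hn
  rw [pvDelta, pvGL_len]
  by_cases hc : (pvGL.getD s PySem.Dict.empty).contains c = true
  · -- goto edge exists: one step up the trie
    have hstay : pvFollow pvGL pvFL s c 96 = s :=
      pvFollow_stay _ _ _ _ _ (by rintro ⟨-, hf⟩; rw [hc] at hf; cases hf)
    rw [hstay]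
    have hsome : ((pvGL.getD s PySem.Dict.empty).get? c).isSome = true := by
      rw [← PySem.Dict.contains_eq_isSome_get?]; exact hc
    rcases Option.isSome_iff_exists.mp hsome with ⟨t, hget⟩
    obtain ⟨ht96, htw⟩ := pvEdge_spec s hs c t hget
    rw [PySem.Dict.getD_of_get?_eq_some _ 0 hget]
    have hmem : pvWordOf s ++ [c] ∈ pvWords := htw ▸ pvWordOf_mem t ht96
    rw [pvLongSuf_of_mem _ hmem, ← htw, pvIdx_wordOf t ht96]
  · rw [Bool.not_eq_true] at hc
    by_cases hs0 : s = 0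
    · -- at the root with no edge: stay at the root
      subst hs0
      have hstay : pvFollow pvGL pvFL 0 c 96 = 0 :=
        pvFollow_stay _ _ _ _ _ (by rintro ⟨h0, -⟩; exact h0 rfl)
      rw [hstay, PySem.Dict.getD_of_not_contains _ 0 hc]
      have hw0 : pvWordOf 0 = [] := rfl
      rw [hw0]
      have hnm : ¬([c] ∈ pvWords) := by
        intro hmem
        have hcon := pvExt_spec [] c (by simpa using hmem)
        rw [pvIdx_nil] at hcon
        rw [hc] at hcon
        exact Bool.noConfusion hcon
      have : pvLongSuf ([] ++ [c]) = [] := by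
        simp only [List.nil_append, pvLongSuf, if_neg hnm]
      rw [this, pvIdx_nil]
    · -- follow the fail link and recurse
      obtain ⟨hf96, hflen, hfsuf, hfmax⟩ := pvFail_spec s hs hs0
      have hstep : pvFollow pvGL pvFL s c 96 =
          pvFollow pvGL pvFL (pvFL.getD s 0) c 96 := by
        have h96 : (96 : Nat) = 95 + 1 := rfl
        rw [h96, pvFollow_succ, if_pos ⟨hs0, hc⟩]
        exact pvFollow_fuel ((pvWordOf (pvFL.getD s 0)).length) _ hf96 le_rfl c 95 96
          (by have := pvWord_short _ hf96; omega) (by have := pvWord_short _ hf96; omega)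
      rw [hstep]
      have hrec := ih ((pvWordOf (pvFL.getD s 0)).length) (by omega) _ hf96 rfl
      rw [pvDelta, pvGL_len] at hrec
      rw [hrec]
      -- the two longest suffixes agree
      congr 1
      refine (pvLongSuf_eq_of (pvWordOf s ++ [c]) _ (pvLongSuf_mem _) ?_ ?_).symm
      · exact (pvLongSuf_suffix _).trans (pvSuffix_append_snoc _ _ _ hfsuf)
      · intro w hw hsuf
        rcases pvSuffix_snoc w _ c hsuf with rfl | ⟨w', rfl, hw't⟩
        · exact List.nil_suffix
        · have hw'mem : w' ∈ pvWords := by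
            have := pvMem_dropLast (w' ++ [c]) hw
            simpa using this
          have hw'ne : w' ≠ pvWordOf s := by
            intro heq
            have hcon := pvExt_spec w' c hw
            rw [heq, pvIdx_wordOf s hs, hc] at hcon
            exact Bool.noConfusion hcon
          have hlt : w'.length < (pvWordOf s).length := by
            rcases Nat.lt_or_ge w'.length (pvWordOf s).length with h | h
            · exact h
            · exact absurd (hw't.eq_of_length (le_antisymm hw't.length_le h)) hw'ne
          have h1 : w' <:+ pvWordOf (pvFL.getD s 0) := hfmax w' hw'mem hw't hlt
          exact pvLongSuf_max _ _ hw (pvSuffix_append_snoc _ _ _ h1)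

-- ===== the scan loop =====
theorem pvHit_longSuf (t : List Char) :
    (∃ p ∈ pvLoweredPatterns, p <:+ pvLongSuf t) ↔ ∃ p ∈ pvLoweredPatterns, p <:+ t := by
  constructor
  · rintro ⟨p, hp, hsuf⟩; exact ⟨p, hp, hsuf.trans (pvLongSuf_suffix t)⟩
  · rintro ⟨p, hp, hsuf⟩
    have hpw : p ∈ pvWords := by
      have h := pvPats_sub
      rw [List.all_eq_true] at h
      simpa using h p hp
    exact ⟨p, hp, pvLongSuf_max t p hpw hsuf⟩

theorem pvLongSuf_snoc (t : List Char) (c : Char) :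
    pvLongSuf (t ++ [c]) = pvLongSuf (pvLongSuf t ++ [c]) := by
  refine (pvLongSuf_eq_of (t ++ [c]) _ (pvLongSuf_mem _) ?_ ?_).symm.symm
  · exact (pvLongSuf_suffix _).trans (pvSuffix_append_snoc _ _ _ (pvLongSuf_suffix t))
  · intro w hw hsuf
    rcases pvSuffix_snoc w t c hsuf with rfl | ⟨w', rfl, hw't⟩
    · exact List.nil_suffix
    · have hw'mem : w' ∈ pvWords := by
        have := pvMem_dropLast (w' ++ [c]) hw
        simpa using this
      have h1 : w' <:+ pvLongSuf t := pvLongSuf_max t w' hw'mem hw't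
      exact pvLongSuf_max _ _ hw (pvSuffix_append_snoc _ _ _ h1)

-- the scan finds exactly the inputs with a pattern ending in some consumed prefix
theorem pvScan_iff (rest : List Char) : ∀ t : List Char,
    (pvScanLoop pvGL pvFL pvOL (pvIdx (pvLongSuf t)) rest = true ↔
      ∃ u, u ≠ [] ∧ u <+: rest ∧ ∃ p ∈ pvLoweredPatterns, p <:+ (t ++ u)) := by
  induction rest with
  | nil =>
    intro t
    simp only [pvScanLoop]
    constructor
    · intro h; cases h
    · rintro ⟨u, hne, hpre, -⟩
      exact absurd (List.prefix_nil.mp hpre) hne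
  | cons c rest ih =>
    intro t
    simp only [pvScanLoop]
    have hs' : pvDelta pvGL pvFL (pvIdx (pvLongSuf t)) c = pvIdx (pvLongSuf (t ++ [c])) := by
      rw [pvStep_eq _ (pvIdx_lt _ (pvLongSuf_mem t)) c,
          pvWordOf_idx _ (pvLongSuf_mem t), ← pvLongSuf_snoc]
    rw [hs']
    have hout : pvOL.getD (pvIdx (pvLongSuf (t ++ [c]))) false = true ↔
        ∃ p ∈ pvLoweredPatterns, p <:+ (t ++ [c]) := by
      rw [pvOut_iff _ (pvIdx_lt _ (pvLongSuf_mem _)), pvWordOf_idx _ (pvLongSuf_mem _),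
          pvHit_longSuf]
    by_cases ho : pvOL.getD (pvIdx (pvLongSuf (t ++ [c]))) false = true
    · rw [if_pos ho]
      constructor
      · intro _
        exact ⟨[c], by simp, ⟨rest, rfl⟩, hout.mp ho⟩
      · intro _; rfl
    · rw [if_neg ho, ih (t ++ [c])]
      constructor
      · rintro ⟨u, hne, hpre, p, hp, hsuf⟩
        refine ⟨c :: u, by simp, ?_, p, hp, ?_⟩
        · rcases hpre with ⟨post, rfl⟩; exact ⟨post, rfl⟩
        · simpa [List.append_assoc] using hsuf
      · rintro ⟨u, hne, hpre, p, hp, hsuf⟩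
        rcases List.prefix_cons_iff.mp hpre with rfl | ⟨u', rfl, hu'⟩
        · exact absurd rfl hne
        · rcases List.eq_nil_or_concat u' with rfl | ⟨l2, b, rfl⟩
          · exact absurd (hout.mpr ⟨p, hp, by simpa using hsuf⟩) ho
          · exact ⟨l2.concat b, by simp, hu', p, hp, by simpa [List.append_assoc] using hsuf⟩

-- A's loop is an existential over its pattern list
theorem pvLoopA_eq_true_iff (ps : List String) (s : List Char) :
    pvLoopA ps s = true ↔ ∃ p ∈ ps, PySem.Chars.isIn (PySem.Chars.lower p.toList) s = true := by
  induction ps with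
  | nil => simp [pvLoopA]
  | cons p rest ih => by_cases h : PySem.Chars.isIn (PySem.Chars.lower p.toList) s = true <;>
      simp [pvLoopA, h, ih]

-- infix = suffix of a nonempty prefix (the patterns are nonempty)
theorem pvInfix_iff (l : List Char) :
    (∃ p ∈ pvLoweredPatterns, p <:+: l) ↔
      ∃ u, u ≠ [] ∧ u <+: l ∧ ∃ p ∈ pvLoweredPatterns, p <:+ u := by
  constructor
  · rintro ⟨p, hp, s, t, rfl⟩
    have hpne : p ≠ [] := by
      have h := pvPats_ne_nil
      rw [List.all_eq_true] at h
      have := h p hp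
      simpa [List.isEmpty_iff] using this
    refine ⟨s ++ p, by simp [hpne], ⟨t, by simp [List.append_assoc]⟩, p, hp, ⟨s, rfl⟩⟩
  · rintro ⟨u, -, hpre, p, hp, hsuf⟩
    exact ⟨p, hp, hsuf.isInfix.trans hpre.isInfix⟩

-- ===== VERDICT (by name: the statement is the Claim_ definition above) =====
theorem is_safe_input_py_spec : Claim_equal_is_safe_input_py := by
  intro text _
  unfold Spec_is_safe_input_py is_safe_input_py is_safe_input_py_alt
  rw [pvAuto_eq]
  set l := PySem.Chars.lower text.toList with hl
  show pvLoopA pvDangerousPatterns l = pvScanLoop pvGL pvFL pvOL 0 l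
  have hstart : (0 : Nat) = pvIdx (pvLongSuf []) := by
    rw [show pvLongSuf [] = [] from rfl, pvIdx_nil]
  have hA : pvLoopA pvDangerousPatterns l = true ↔ ∃ p ∈ pvLoweredPatterns, p <:+: l := by
    rw [pvLoopA_eq_true_iff]
    constructor
    · rintro ⟨p, hp, hin⟩
      exact ⟨PySem.Chars.lower p.toList,
        by rw [← pvPatterns_lower]; exact List.mem_map_of_mem hp,
        (PySem.Chars.isIn_iff_infix _ _).mp hin⟩
    · rintro ⟨q, hq, hinf⟩
      rw [← pvPatterns_lower] at hq
      rcases List.mem_map.mp hq with ⟨p, hp, rfl⟩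
      exact ⟨p, hp, (PySem.Chars.isIn_iff_infix _ _).mpr hinf⟩
  have hB : pvScanLoop pvGL pvFL pvOL 0 l = true ↔ ∃ p ∈ pvLoweredPatterns, p <:+: l := by
    rw [hstart, pvScan_iff l [], pvInfix_iff]
    simp
  cases hb : pvScanLoop pvGL pvFL pvOL 0 l with
  | true => exact hA.mpr (hB.mp hb)
  | false =>
    cases ha : pvLoopA pvDangerousPatterns l with
    | false => rfl
    | true => rw [hB.mpr (hA.mp ha)] at hb; exact absurd hb (by simp)
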